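-- pv_equiv track=rewrite | github.com/tommyham/SleepGPT | main/preprocessing/cap/preprocessing.py | normalize_channel_name
-- ===== SOURCE A (Python) =====
-- def normalize_channel_name(name):
--     """
--     Normalize EEG/EMG/EOG channel names to a consistent standard.
--
--     Parameters:
--     - name (str): The original channel name from the data.
--
--     Returns:
--     - str: The normalized channel name.
--     """
--     name = name.lower()  # Convert to lowercase for uniformity
--
--     # Dictionary to map categories to normalized names
--     normalization_map = {
--         'loc': ['loc', 'eog-l', 'loc-a1', 'eog-loc', 'loc / a2'],
--         'roc': ['roc', 'eog-r', 'roc-a2', 'roc / a1'],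
--         'eog': ['roc-loc', 'eog dx'],
--         'chin1': ['chin1', 'emg1'],
--         'chin2': ['chin2', 'emg2'],
--         'emg': ['emg1-emg2', 'emg', 'emg-emg'],
--         'f3': ['f3', 'f3a2', 'f3-c3'],
--         'c3': ['c3', 'c3a2', 'c3-a2', 'c3-p3'],
--         'c4': ['c4', 'c4a1', 'c4-a1', 'c4-p4'],
--         'o1': ['o1', 'o1a2', 'o1-a2'],
--     }
--
--     # Iterate through the map and normalize
--     for normalized_name, possible_names in normalization_map.items():
--         if name in possible_names:
--             return normalized_name  # Return the normalized name if found
--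
--     # If no match, return the original name (or raise an exception if needed)
--     return name
-- ===== SOURCE B (Python) =====
-- # Single flat reverse map: each possible spelling points directly to its
-- # normalized name; lookup replaces the group-by-group membership scan.
-- _REVERSE_MAP = {
--     'loc': 'loc', 'eog-l': 'loc', 'loc-a1': 'loc', 'eog-loc': 'loc', 'loc / a2': 'loc',
--     'roc': 'roc', 'eog-r': 'roc', 'roc-a2': 'roc', 'roc / a1': 'roc',
--     'roc-loc': 'eog', 'eog dx': 'eog',
--     'chin1': 'chin1', 'emg1': 'chin1',
--     'chin2': 'chin2', 'emg2': 'chin2',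
--     'emg1-emg2': 'emg', 'emg': 'emg', 'emg-emg': 'emg',
--     'f3': 'f3', 'f3a2': 'f3', 'f3-c3': 'f3',
--     'c3': 'c3', 'c3a2': 'c3', 'c3-a2': 'c3', 'c3-p3': 'c3',
--     'c4': 'c4', 'c4a1': 'c4', 'c4-a1': 'c4', 'c4-p4': 'c4',
--     'o1': 'o1', 'o1a2': 'o1', 'o1-a2': 'o1',
-- }
--
--
-- def normalize_channel_name(name):
--     name = name.lower()
--     return _REVERSE_MAP.get(name, name)
-- ===== Notes on version B (the rewrite author's own statement) =====
-- stated objective: simpler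
-- what changed: Replaces the loop over grouped lists with a per-group membership test by a single precomputed flat spelling-to-normalized-name dict and one .get lookup, removing the loop and branch entirely.
import Mathlib
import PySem

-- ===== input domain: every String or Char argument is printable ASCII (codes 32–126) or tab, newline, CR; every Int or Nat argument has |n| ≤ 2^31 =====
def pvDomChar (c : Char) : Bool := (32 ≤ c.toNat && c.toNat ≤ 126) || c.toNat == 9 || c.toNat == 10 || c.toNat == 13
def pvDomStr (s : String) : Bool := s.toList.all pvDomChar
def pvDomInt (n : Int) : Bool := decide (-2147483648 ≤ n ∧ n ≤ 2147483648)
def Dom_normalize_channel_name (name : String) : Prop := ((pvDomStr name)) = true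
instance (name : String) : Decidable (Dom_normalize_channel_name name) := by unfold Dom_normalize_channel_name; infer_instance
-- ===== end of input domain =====

-- B replaces A's scan over grouped spelling lists by one flat spelling→name dict lookup (simpler; same result).

-- ===== PORT A =====
-- the grouped normalization_map, in insertion order
def pvGroups : List (String × List String) :=
  [("loc", ["loc", "eog-l", "loc-a1", "eog-loc", "loc / a2"]),
   ("roc", ["roc", "eog-r", "roc-a2", "roc / a1"]),
   ("eog", ["roc-loc", "eog dx"]),
   ("chin1", ["chin1", "emg1"]),
   ("chin2", ["chin2", "emg2"]),
   ("emg", ["emg1-emg2", "emg", "emg-emg"]),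
   ("f3", ["f3", "f3a2", "f3-c3"]),
   ("c3", ["c3", "c3a2", "c3-a2", "c3-p3"]),
   ("c4", ["c4", "c4a1", "c4-a1", "c4-p4"]),
   ("o1", ["o1", "o1a2", "o1-a2"])]

-- the 'for … in normalization_map.items(): if name in possible_names: return …' loop
def pvScanA (gs : List (String × List String)) (n : String) : String :=
  match gs with
  | [] => n
  | (k, ps) :: rest => if ps.contains n then k else pvScanA rest n

def normalize_channel_name (name : String) : String :=
  let n := PySem.Str.lower name
  pvScanA pvGroups n

-- ===== PORT B =====
-- the flat _REVERSE_MAP literal from Source B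
def pvRev : List (String × String) :=
  [("loc", "loc"), ("eog-l", "loc"), ("loc-a1", "loc"), ("eog-loc", "loc"), ("loc / a2", "loc"),
   ("roc", "roc"), ("eog-r", "roc"), ("roc-a2", "roc"), ("roc / a1", "roc"),
   ("roc-loc", "eog"), ("eog dx", "eog"),
   ("chin1", "chin1"), ("emg1", "chin1"),
   ("chin2", "chin2"), ("emg2", "chin2"),
   ("emg1-emg2", "emg"), ("emg", "emg"), ("emg-emg", "emg"),
   ("f3", "f3"), ("f3a2", "f3"), ("f3-c3", "f3"),
   ("c3", "c3"), ("c3a2", "c3"), ("c3-a2", "c3"), ("c3-p3", "c3"),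
   ("c4", "c4"), ("c4a1", "c4"), ("c4-a1", "c4"), ("c4-p4", "c4"),
   ("o1", "o1"), ("o1a2", "o1"), ("o1-a2", "o1")]

def normalize_channel_name_alt (name : String) : String :=
  let n := PySem.Str.lower name
  PySem.Dict.getD (PySem.Dict.mk pvRev) n n

-- ===== PRECONDITION & SPEC =====
def Spec_normalize_channel_name (name : String) (out : String) : Prop := out = normalize_channel_name_alt name
instance (name : String) (out : String) : Decidable (Spec_normalize_channel_name name out) := by unfold Spec_normalize_channel_name; infer_instance

-- ===== CLAIM (what is proved, stated in full; the proofs are below) =====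
def Claim_equal_normalize_channel_name : Prop := ∀ (name : String), Dom_normalize_channel_name name → Spec_normalize_channel_name name (normalize_channel_name name)

-- ===== LEMMAS AND PROOFS =====

-- flattening a group: membership scan over one list = lookup in its exploded pairs, with the rest as fallback
theorem pvScan_flat (gs : List (String × List String)) (n : String) :
    pvScanA gs n
      = PySem.Dict.getD (PySem.Dict.mk (gs.flatMap (fun g => g.2.map (fun s => (s, g.1))))) n n := by
  induction gs with
  | nil => simp [pvScanA, PySem.Dict.getD, PySem.Dict.get?]
  | cons g rest ih =>
    obtain ⟨k, ps⟩ := g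
    induction ps with
    | nil => simpa [pvScanA] using ih
    | cons p tl ihp =>
      by_cases h : n = p
      · simp [pvScanA, PySem.Dict.getD, PySem.Dict.get?_mk_cons, h]
      · have h' : ¬ p = n := fun e => h e.symm
        have := ihp
        simp [pvScanA, h, h', PySem.Dict.getD, PySem.Dict.get?_mk_cons] at this ⊢
        exact this

-- the literal flat map of Source B is exactly the exploded grouped map
theorem pvRev_eq : pvRev = pvGroups.flatMap (fun g => g.2.map (fun s => (s, g.1))) := by decide

-- ===== VERDICT (by name: the statement is the Claim_ definition above) =====
theorem normalize_channel_name_spec : Claim_equal_normalize_channel_name := by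
  intro name _
  unfold Spec_normalize_channel_name normalize_channel_name normalize_channel_name_alt
  rw [pvRev_eq]
  exact pvScan_flat pvGroups (PySem.Str.lower name)
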